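-- pv_equiv track=rewrite | github.com/xlisp/jim-emacs-fun-py | parse_walk_in_start_main.py | find_one_path
-- ===== SOURCE A (Python) =====
-- def find_one_path(functions, start_function):
--     path = []
--     visited = set()
--
--     def dfs(function):
--         if function not in visited:
--             visited.add(function)
--             path.append(function)
--             if function in functions:
--                 for called_function in functions[function]:
--                     dfs(called_function)
--
--     dfs(start_function)
--     return path
-- ===== SOURCE B (Python) =====
-- def find_one_path(functions, start_function):
--     path = []
--     visited = set()
--     stack = [start_function]
--     while stack:
--         node = stack.pop()
--         if node in visited:
--             continue
--         visited.add(node)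
--         path.append(node)
--         if node in functions:
--             stack.extend(reversed(functions[node]))
--     return path
-- ===== Notes on version B (the rewrite author's own statement) =====
-- stated objective: alternative
-- what changed: The recursive nested-closure DFS is replaced by an iterative DFS over an explicit stack (mark-on-pop, successors pushed in reversed order), eliminating recursion entirely.
import Mathlib
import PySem

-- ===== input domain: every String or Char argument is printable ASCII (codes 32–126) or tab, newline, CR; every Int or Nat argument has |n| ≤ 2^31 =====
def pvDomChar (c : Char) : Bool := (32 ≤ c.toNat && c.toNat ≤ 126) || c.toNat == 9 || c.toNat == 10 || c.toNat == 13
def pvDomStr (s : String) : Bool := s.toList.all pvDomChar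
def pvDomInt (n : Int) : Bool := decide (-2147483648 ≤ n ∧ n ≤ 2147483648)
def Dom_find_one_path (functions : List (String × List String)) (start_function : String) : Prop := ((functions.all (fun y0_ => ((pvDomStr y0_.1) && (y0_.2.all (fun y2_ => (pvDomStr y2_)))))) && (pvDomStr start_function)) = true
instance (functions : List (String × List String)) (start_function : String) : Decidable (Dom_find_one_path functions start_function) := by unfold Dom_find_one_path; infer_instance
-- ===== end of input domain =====

-- B replaces A's recursive nested-closure DFS by an iterative explicit-stack DFS
-- (mark visited on pop, successors pushed in reversed order); same return value.

-- Universe of nodes a traversal can ever visit: the start plus every successor value.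
-- Used only for the termination measures / membership hypotheses of the recursions.
def pvU (functions : List (String × List String)) (start_function : String) : List String :=
  start_function :: functions.flatMap (fun kv => kv.2)

-- number of elements of U not yet in the visited list v (termination measure)
def pvCnt (v U : List String) : Nat := (U.filter (fun x => !(decide (x ∈ v)))).length

def pvK (functions : List (String × List String)) : Nat :=
  (functions.flatMap (fun kv => kv.2)).length

theorem pvCnt_append_le (v r U : List String) : pvCnt (v ++ r) U ≤ pvCnt v U := by
  induction U with
  | nil => simp [pvCnt]
  | cons u U ih =>
    simp only [pvCnt, List.filter] at *
    by_cases hu : u ∈ v ++ r <;> by_cases hv : u ∈ v <;>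
      simp_all [List.mem_append] <;> omega

theorem pvCnt_lt (v U : List String) (n : String) (hU : n ∈ U) (hv : n ∉ v) :
    pvCnt (v ++ [n]) U < pvCnt v U := by
  induction U with
  | nil => simp at hU
  | cons u U ih =>
    rcases List.mem_cons.mp hU with h | h
    · subst h
      have h1 : pvCnt (v ++ [n]) U ≤ pvCnt v U := pvCnt_append_le v [n] U
      simp only [pvCnt, List.filter, List.mem_append, List.mem_singleton] at *
      simp [hv] at *
      omega
    · have h2 := ih h
      simp only [pvCnt, List.filter] at *
      by_cases hu : u ∈ v ++ [n] <;> by_cases hv' : u ∈ v <;>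
        simp_all [List.mem_append] <;> omega

theorem pv_len_le_flatMap {l : List (String × List String)} {kv : String × List String}
    (h : kv ∈ l) : kv.2.length ≤ (l.flatMap (fun kv => kv.2)).length := by
  induction l with
  | nil => simp at h
  | cons a l ih =>
    rw [List.flatMap_cons, List.length_append]
    rcases List.mem_cons.mp h with h | h
    · subst h; omega
    · have := ih h; omega

-- first-match lookup of a dict key, for `function in functions` + `functions[function]`
def pvChildren (functions : List (String × List String)) (n : String) : List String :=
  match functions.find? (fun kv => kv.1 == n) with
  | some kv => kv.2
  | none => []

theorem pv_find?_mem_subset {functions : List (String × List String)} {n : String}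
    {kv : String × List String} (h : functions.find? (fun kv => kv.1 == n) = some kv)
    (s : String) : ∀ x ∈ kv.2, x ∈ pvU functions s := by
  intro x hx
  have hmem : kv ∈ functions := List.mem_of_find?_eq_some h
  exact List.mem_cons.mpr (Or.inr (List.mem_flatMap.mpr ⟨kv, hmem, hx⟩))

theorem pvChildren_len_le (functions : List (String × List String)) (n : String) :
    (pvChildren functions n).length ≤ pvK functions := by
  unfold pvChildren
  cases h : functions.find? (fun kv => kv.1 == n) with
  | none => simp
  | some kv => exact pv_len_le_flatMap (List.mem_of_find?_eq_some h)

theorem pvAdd_eq {v : List String} {n : String} (h : n ∉ v) :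
    PySem.Set.add v n = v ++ [n] := by
  simp [PySem.Set.add, PySem.Set.contains, h]

-- arithmetic helpers for the termination measures
theorem pv_push_lt {K L c1 c2 : Nat} (h : c1 < c2) (hL : L ≤ K) :
    c1 * (K + 2) + L + 2 < c2 * (K + 2) + 1 := by
  have h1 : (c1 + 1) * (K + 2) ≤ c2 * (K + 2) := Nat.mul_le_mul_right _ (by omega)
  have h2 : (c1 + 1) * (K + 2) = c1 * (K + 2) + (K + 2) := by ring
  omega

theorem pv_step_lt {k l1 l2 c1 c2 : Nat} (h : c1 ≤ c2) (hl : l1 < l2) :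
    c1 * k + l1 + 2 < c2 * k + l2 + 2 := by
  have := Nat.mul_le_mul_right k h; omega

-- ===== PORT A =====
-- A's recursive dfs over the mutated pair (visited, path). Since every update appends
-- the SAME new node to both `visited` (a set, kept in PySem.Set insertion order) and
-- `path`, the recursion is threaded in state-passing style: `st` is the pair
-- (visited, path) and each function returns the suffix of newly visited nodes that A's
-- dfs appends to both components (the final path is the initial path plus that suffix).
-- The membership hypotheses (`hn`, `hns`) and the measure only serve termination.
mutual
def dfsA (functions : List (String × List String)) (start_function : String)
    (st : List String × List String) (n : String) (hn : n ∈ pvU functions start_function) :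
    List String :=
  if hmem : n ∈ st.1 then []      -- `if function not in visited` fails: nothing happens
  else
    -- visited.add(function); path.append(function); if function in functions: for … dfs(…)
    match hfind : functions.find? (fun kv => kv.1 == n) with
    | some kv =>
        n :: dfsListA functions start_function (PySem.Set.add st.1 n, st.2 ++ [n]) kv.2
          (fun x hx => pv_find?_mem_subset hfind start_function x hx)
    | none => [n]
termination_by pvCnt st.1 (pvU functions start_function) * (pvK functions + 2) + 1
decreasing_by
  have hc : pvCnt (PySem.Set.add st.1 n) (pvU functions start_function)
      < pvCnt st.1 (pvU functions start_function) := by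
    rw [pvAdd_eq hmem]; exact pvCnt_lt _ _ _ hn hmem
  have hlen : kv.2.length ≤ pvK functions := by
    have h := pvChildren_len_le functions n
    unfold pvChildren at h; rw [hfind] at h; exact h
  exact pv_push_lt hc hlen

-- the `for called_function in functions[function]: dfs(called_function)` loop
def dfsListA (functions : List (String × List String)) (start_function : String)
    (st : List String × List String) (ns : List String)
    (hns : ∀ x ∈ ns, x ∈ pvU functions start_function) : List String :=
  match ns with
  | [] => []
  | n :: ns' =>
    let d := dfsA functions start_function st n (hns n (by simp))
    d ++ dfsListA functions start_function (st.1 ++ d, st.2 ++ d) ns'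
          (fun x hx => hns x (by simp [hx]))
termination_by pvCnt st.1 (pvU functions start_function) * (pvK functions + 2) + ns.length + 2
decreasing_by
  · omega
  · exact pv_step_lt (pvCnt_append_le _ _ _) (by simp)
end

def find_one_path (functions : List (String × List String)) (start_function : String) : List String :=
  -- path = []; visited = set(); dfs(start_function); return path
  ([] : List String) ++ dfsA functions start_function ([], []) start_function (by simp [pvU])

-- ===== PORT B =====
-- B's loop over (visited, path) and the explicit stack. The stack's top is the list
-- HEAD here (Python pops from the end and pushes `reversed(functions[node])`, which in
-- head-at-top form is exactly `kv.2 ++ stack'`). hstk serves termination only.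
def loopB (functions : List (String × List String)) (start_function : String)
    (st : List String × List String) (stack : List String)
    (hstk : ∀ x ∈ stack, x ∈ pvU functions start_function) : List String :=
  match stack with
  | [] => st.2
  | n :: stk' =>
    if hmem : n ∈ st.1 then      -- `if node in visited: continue`
      loopB functions start_function st stk' (fun x hx => hstk x (by simp [hx]))
    else
      -- visited.add(node); path.append(node); if node in functions: push successors
      match hfind : functions.find? (fun kv => kv.1 == n) with
      | some kv =>
          loopB functions start_function (PySem.Set.add st.1 n, st.2 ++ [n]) (kv.2 ++ stk')
            (fun x hx => (List.mem_append.mp hx).elim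
              (fun h => pv_find?_mem_subset hfind start_function x h)
              (fun h => hstk x (by simp [h])))
      | none =>
          loopB functions start_function (PySem.Set.add st.1 n, st.2 ++ [n]) stk'
            (fun x hx => hstk x (by simp [hx]))
termination_by (pvCnt st.1 (pvU functions start_function), stack.length)
decreasing_by
  · exact Prod.Lex.right _ (by simp)
  · exact Prod.Lex.left _ _ (by
      rw [pvAdd_eq hmem]; exact pvCnt_lt _ _ _ (hstk n (by simp)) hmem)
  · exact Prod.Lex.left _ _ (by
      rw [pvAdd_eq hmem]; exact pvCnt_lt _ _ _ (hstk n (by simp)) hmem)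

def find_one_path_alt (functions : List (String × List String)) (start_function : String) : List String :=
  -- path = []; visited = set(); stack = [start_function]; while stack: …; return path
  loopB functions start_function ([], []) [start_function] (by simp [pvU])

-- ===== PRECONDITION & SPEC =====
def Spec_find_one_path (functions : List (String × List String)) (start_function : String) (out : List String) : Prop := out = find_one_path_alt functions start_function
instance (functions : List (String × List String)) (start_function : String) (out : List String) : Decidable (Spec_find_one_path functions start_function out) := by unfold Spec_find_one_path; infer_instance

-- ===== CLAIM (what is proved, stated in full; the proofs are below) =====
def Claim_equal_find_one_path : Prop := ∀ (functions : List (String × List String)) (start_function : String), Dom_find_one_path functions start_function → Spec_find_one_path functions start_function (find_one_path functions start_function)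

-- ===== LEMMAS AND PROOFS =====

theorem pvChildren_subset (functions : List (String × List String)) (s n : String) :
    ∀ x ∈ pvChildren functions n, x ∈ pvU functions s := by
  unfold pvChildren
  cases h : functions.find? (fun kv => kv.1 == n) with
  | none => simp
  | some kv => exact pv_find?_mem_subset h s

theorem dfsListA_congr (functions : List (String × List String)) (s : String)
    {st1 st2 : List String × List String} {ns1 ns2 : List String}
    (hst : st1 = st2) (h : ns1 = ns2)
    (h1 : ∀ x ∈ ns1, x ∈ pvU functions s) (h2 : ∀ x ∈ ns2, x ∈ pvU functions s) :
    dfsListA functions s st1 ns1 h1 = dfsListA functions s st2 ns2 h2 := by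
  subst hst; subst h; rfl

theorem loopB_congr (functions : List (String × List String)) (s : String)
    {st1 st2 : List String × List String} {stk1 stk2 : List String}
    (hst : st1 = st2) (h : stk1 = stk2)
    (h1 : ∀ x ∈ stk1, x ∈ pvU functions s) (h2 : ∀ x ∈ stk2, x ∈ pvU functions s) :
    loopB functions s st1 stk1 h1 = loopB functions s st2 stk2 h2 := by
  subst hst; subst h; rfl

theorem dfsListA_nil (functions : List (String × List String)) (s : String)
    (st : List String × List String) (h : ∀ x ∈ ([] : List String), x ∈ pvU functions s) :
    dfsListA functions s st [] h = [] := by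
  rw [dfsListA.eq_def]

theorem dfsListA_cons (functions : List (String × List String)) (s : String)
    (st : List String × List String) (n : String) (ns : List String)
    (h : ∀ x ∈ n :: ns, x ∈ pvU functions s) :
    dfsListA functions s st (n :: ns) h
      = dfsA functions s st n (h n (by simp))
        ++ dfsListA functions s
            (st.1 ++ dfsA functions s st n (h n (by simp)),
             st.2 ++ dfsA functions s st n (h n (by simp))) ns
            (fun x hx => h x (by simp [hx])) := by
  rw [dfsListA.eq_def]

theorem dfsA_mem (functions : List (String × List String)) (s : String)
    (st : List String × List String) (n : String) (hn : n ∈ pvU functions s)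
    (hmem : n ∈ st.1) : dfsA functions s st n hn = [] := by
  rw [dfsA.eq_def, dif_pos hmem]

theorem dfsA_not_mem (functions : List (String × List String)) (s : String)
    (st : List String × List String) (n : String) (hn : n ∈ pvU functions s)
    (hmem : n ∉ st.1) :
    dfsA functions s st n hn
      = n :: dfsListA functions s (st.1 ++ [n], st.2 ++ [n]) (pvChildren functions n)
          (pvChildren_subset functions s n) := by
  rw [dfsA.eq_def, dif_neg hmem]
  split
  · rename_i kv hfind
    rw [dfsListA_congr functions s (by rw [pvAdd_eq hmem])
      (show kv.2 = pvChildren functions n by unfold pvChildren; rw [hfind]) _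
      (pvChildren_subset functions s n)]
  · rename_i hfind
    have hc : pvChildren functions n = [] := by unfold pvChildren; rw [hfind]
    rw [dfsListA_congr functions s (rfl) hc (pvChildren_subset functions s n) (by simp),
      dfsListA_nil]

theorem loopB_nil (functions : List (String × List String)) (s : String)
    (st : List String × List String) (h : ∀ x ∈ ([] : List String), x ∈ pvU functions s) :
    loopB functions s st [] h = st.2 := by
  rw [loopB.eq_def]

theorem loopB_cons_mem (functions : List (String × List String)) (s : String)
    (st : List String × List String) (n : String) (stk : List String)
    (h : ∀ x ∈ n :: stk, x ∈ pvU functions s) (hmem : n ∈ st.1) :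
    loopB functions s st (n :: stk) h
      = loopB functions s st stk (fun x hx => h x (by simp [hx])) := by
  rw [loopB.eq_def]
  simp only [dif_pos hmem]

theorem loopB_cons_not_mem (functions : List (String × List String)) (s : String)
    (st : List String × List String) (n : String) (stk : List String)
    (h : ∀ x ∈ n :: stk, x ∈ pvU functions s) (hmem : n ∉ st.1) :
    loopB functions s st (n :: stk) h
      = loopB functions s (st.1 ++ [n], st.2 ++ [n]) (pvChildren functions n ++ stk)
          (fun x hx => (List.mem_append.mp hx).elim
            (fun hx' => pvChildren_subset functions s n x hx')
            (fun hx' => h x (by simp [hx']))) := by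
  rw [loopB.eq_def]
  simp only [dif_neg hmem]
  split
  · rename_i kv hfind
    exact loopB_congr functions s (by rw [pvAdd_eq hmem])
      (by unfold pvChildren; rw [hfind]) _ _
  · rename_i hfind
    have hc : pvChildren functions n = [] := by unfold pvChildren; rw [hfind]
    exact loopB_congr functions s (by rw [pvAdd_eq hmem]) (by rw [hc]; simp) _ _

-- Main invariant: running B's loop on ns ++ stk equals first running A's dfs loop over
-- ns (appending its delta to visited and path), then B's loop on stk from that state.
theorem pv_loop_eq (functions : List (String × List String)) (s : String) :
    ∀ (m : Nat) (st : List String × List String) (ns stk : List String)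
      (hns : ∀ x ∈ ns, x ∈ pvU functions s) (hstk : ∀ x ∈ stk, x ∈ pvU functions s)
      (hq : ∀ x ∈ ns ++ stk, x ∈ pvU functions s)
      (hlen : ns.length ≤ pvK functions + 1)
      (hm : pvCnt st.1 (pvU functions s) * (pvK functions + 2) + ns.length ≤ m),
      loopB functions s st (ns ++ stk) hq
        = loopB functions s
            (st.1 ++ dfsListA functions s st ns hns, st.2 ++ dfsListA functions s st ns hns)
            stk hstk := by
  intro m
  induction m using Nat.strong_induction_on with
  | _ m IH =>
    intro st ns stk hns hstk hq hlen hm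
    cases ns with
    | nil =>
      rw [dfsListA_nil]
      exact loopB_congr functions s (by simp) (by simp) _ _
    | cons n ns' =>
      have hq2 : ∀ x ∈ n :: (ns' ++ stk), x ∈ pvU functions s := hq
      rw [loopB_congr functions s rfl
        (show ((n :: ns') ++ stk : List String) = n :: (ns' ++ stk) by simp) hq hq2]
      rw [dfsListA_cons]
      by_cases hmem : n ∈ st.1
      · rw [dfsA_mem functions s st n _ hmem]
        rw [loopB_cons_mem functions s st n (ns' ++ stk) hq2 hmem]
        have hL : (n :: ns').length = ns'.length + 1 := rfl
        have hlen' : ns'.length ≤ pvK functions + 1 := by omega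
        have hm' : pvCnt st.1 (pvU functions s) * (pvK functions + 2) + ns'.length ≤ m - 1 := by
          omega
        rw [IH (m - 1) (by omega) st ns' stk (fun x hx => hns x (by simp [hx])) hstk
          (fun x hx => hq2 x (by simp [hx])) hlen' hm']
        refine loopB_congr functions s ?_ rfl _ _
        simp only [List.append_nil, List.nil_append, Prod.mk.eta]
      · rw [dfsA_not_mem functions s st n _ hmem]
        rw [loopB_cons_not_mem functions s st n (ns' ++ stk) hq2 hmem]
        have hcK := pvChildren_len_le functions n
        have hc : pvCnt (st.1 ++ [n]) (pvU functions s) < pvCnt st.1 (pvU functions s) :=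
          pvCnt_lt _ _ _ (hns n (by simp)) hmem
        have hL : (n :: ns').length = ns'.length + 1 := rfl
        have hKm : pvCnt st.1 (pvU functions s) * (pvK functions + 2) + 1 ≤ m := by omega
        have hmul : (pvCnt (st.1 ++ [n]) (pvU functions s) + 1) * (pvK functions + 2)
            ≤ pvCnt st.1 (pvU functions s) * (pvK functions + 2) :=
          Nat.mul_le_mul_right _ (by omega)
        have hmul' : (pvCnt (st.1 ++ [n]) (pvU functions s) + 1) * (pvK functions + 2)
            = pvCnt (st.1 ++ [n]) (pvU functions s) * (pvK functions + 2)
              + (pvK functions + 2) := by ring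
        have harith : pvCnt (st.1 ++ [n]) (pvU functions s) * (pvK functions + 2)
            + (pvChildren functions n).length ≤ m - 1 := by omega
        rw [IH (m - 1) (by omega) (st.1 ++ [n], st.2 ++ [n])
          (pvChildren functions n) (ns' ++ stk) (pvChildren_subset functions s n)
          (fun x hx => hq2 x (by simp [hx])) _
          (by omega) harith]
        have hle2 : pvCnt ((st.1 ++ [n]) ++ dfsListA functions s (st.1 ++ [n], st.2 ++ [n])
              (pvChildren functions n) (pvChildren_subset functions s n)) (pvU functions s)
            ≤ pvCnt (st.1 ++ [n]) (pvU functions s) := pvCnt_append_le _ _ _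
        have harith2 : pvCnt ((st.1 ++ [n]) ++ dfsListA functions s (st.1 ++ [n], st.2 ++ [n])
              (pvChildren functions n) (pvChildren_subset functions s n)) (pvU functions s)
            * (pvK functions + 2) + ns'.length ≤ m - 1 := by
          have h1 := Nat.mul_le_mul_right (pvK functions + 2) hle2
          have h4 : ns'.length ≤ pvK functions + 1 := by omega
          omega
        rw [IH (m - 1) (by omega)
          ((st.1 ++ [n]) ++ dfsListA functions s (st.1 ++ [n], st.2 ++ [n])
              (pvChildren functions n) (pvChildren_subset functions s n),
           (st.2 ++ [n]) ++ dfsListA functions s (st.1 ++ [n], st.2 ++ [n])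
              (pvChildren functions n) (pvChildren_subset functions s n))
          ns' stk (fun x hx => hns x (by simp [hx])) hstk
          (fun x hx => hq2 x (by simp [hx]))
          (by omega) harith2]
        refine loopB_congr functions s ?_ rfl _ _
        simp only [List.append_assoc, List.singleton_append, List.cons_append,
          List.nil_append]

-- ===== VERDICT (by name: the statement is the Claim_ definition above) =====
theorem find_one_path_spec : Claim_equal_find_one_path := by
  intro functions s _
  unfold Spec_find_one_path find_one_path find_one_path_alt
  have hns : ∀ x ∈ [s], x ∈ pvU functions s := by simp [pvU]
  have hstk : ∀ x ∈ ([] : List String), x ∈ pvU functions s := by simp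
  have hq : ∀ x ∈ ([s] ++ [] : List String), x ∈ pvU functions s := by simp [pvU]
  have h := pv_loop_eq functions s
    (pvCnt ([] : List String) (pvU functions s) * (pvK functions + 2) + 1)
    (([], []) : List String × List String) [s] [] hns hstk hq (by simp) (by simp)
  calc ([] : List String) ++ dfsA functions s ([], []) s (by simp [pvU])
      = ([] : List String) ++ dfsListA functions s ([], []) [s] hns := by
        rw [dfsListA_cons, dfsListA_nil]; simp
    _ = loopB functions s
          (([] : List String) ++ dfsListA functions s ([], []) [s] hns,
           ([] : List String) ++ dfsListA functions s ([], []) [s] hns) [] hstk :=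
        (loopB_nil functions s
          (([] : List String) ++ dfsListA functions s ([], []) [s] hns,
           ([] : List String) ++ dfsListA functions s ([], []) [s] hns) hstk).symm
    _ = loopB functions s ([], []) [s] (by simp [pvU]) := by
        rw [← h]
        exact loopB_congr functions s rfl (by simp) _ _
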